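-- pv_equiv track=rewrite | github.com/johnwatterlond/rosalind | scripts/lexv.py | nums_to_letters
-- ===== SOURCE A (Python) =====
-- import itertools
--
-- def perms_up_to_n_from_m(n, m):
--     """
--     Return all perms of size up to n from the numbers in range(m).
--     Used later when converting numbers to letters.
--     """
--     yield from sorted(string
--     for i in range(1, n + 1)
--     for string in itertools.product(range(m), repeat=i))
--
-- def create_dict(s):
--     """
--     Create dictionary from string.
--     'DNA'--> {0:'D', 1:'N', 2:'A'}
--     """
--     return dict(zip(range(len(s)), s))
--
-- def nums_to_letters(s, n):
--     d = create_dict(s)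
--     m = len(s)
--     perm_nums = list(perms_up_to_n_from_m(n, m))
--
--     letter_perms = [list(x) for x in perm_nums]
--     for x in letter_perms:
--         for i, num in enumerate(x):
--             x[i] = d[num]
--
--     return [''.join(x) for x in letter_perms]
-- ===== SOURCE B (Python) =====
-- def nums_to_letters(s, n):
--     # Build the answer bottom-up on the suffix depth: after k rounds, acc holds
--     # every string of length 1..k over s, in A's (prefix-first lexicographic-by-
--     # alphabet-position) order; no sorting, no number tuples, no dict.
--     acc = []
--     for _ in range(n):
--         acc = [c + w for c in s for w in [''] + acc]
--     return acc
-- ===== Notes on version B (the rewrite author's own statement) =====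
-- stated objective: faster
-- what changed: A materialises all number tuples of length 1..n via itertools.product, sorts them, and translates through an index dict; B builds the strings directly in the required prefix-first lexicographic order by one bottom-up pass (acc_k = all words of length 1..k, emitted by prepending each letter to '' and acc_{k-1}), so the sort, the tuples and the dict disappear.
import Mathlib
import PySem

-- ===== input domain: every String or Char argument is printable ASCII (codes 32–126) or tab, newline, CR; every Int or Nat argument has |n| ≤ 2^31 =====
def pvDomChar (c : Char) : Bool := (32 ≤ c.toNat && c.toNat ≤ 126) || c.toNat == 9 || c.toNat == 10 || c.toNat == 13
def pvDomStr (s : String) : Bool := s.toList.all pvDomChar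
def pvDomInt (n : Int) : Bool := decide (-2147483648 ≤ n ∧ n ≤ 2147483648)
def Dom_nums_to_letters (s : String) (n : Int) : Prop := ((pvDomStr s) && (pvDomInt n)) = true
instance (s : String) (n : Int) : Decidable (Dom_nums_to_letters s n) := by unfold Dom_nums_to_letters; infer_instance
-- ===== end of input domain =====

-- B replaces A's generate-all-tuples-then-sort-then-translate pipeline by a bottom-up
-- construction that emits the strings directly in the sorted order (no sort, no dict).

-- ===== PORT A =====

-- itertools.product(range(m), repeat=i), in CPython's order (first coordinate outermost)
def pvProduct (m : Int) : Nat → List (List Int)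
  | 0 => [[]]
  | k + 1 => (PySem.List.pyRange 0 m 1).flatMap (fun a => (pvProduct m k).map (fun t => a :: t))

-- sorted(string for i in range(1, n+1) for string in product(range(m), repeat=i))
def perms_up_to_n_from_m (n m : Int) : List (List Int) :=
  PySem.List.sorted ((PySem.List.pyRange 1 (n + 1) 1).flatMap (fun i => pvProduct m i.toNat))
    (fun x => x) false

-- dict(zip(range(len(s)), s))
def create_dict (s : String) : PySem.Dict Int Char :=
  PySem.Dict.ofList ((PySem.List.pyRange 0 (PySem.Str.len s) 1).zip s.toList)

def nums_to_letters (s : String) (n : Int) : List String :=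
  let d := create_dict s
  let m := PySem.Str.len s
  let perm_nums := perms_up_to_n_from_m n m
  -- 'for i, num in enumerate(x): x[i] = d[num]' replaces every element in place;
  -- every num lies in 0..m-1, so the key is always present and the KeyError branch
  -- is unreachable: d[num] is getD with an arbitrary default
  let letter_perms := perm_nums.map (fun x => x.map (fun num => PySem.Dict.getD d num ' '))
  letter_perms.map String.ofList

-- ===== PORT B =====
def nums_to_letters_alt (s : String) (n : Int) : List String :=
  (PySem.List.pyRange 0 n 1).foldl
    (fun acc _ => s.toList.flatMap (fun c => ("" :: acc).map (fun w => String.ofList (c :: w.toList))))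
    []

-- ===== PRECONDITION & SPEC =====
def Spec_nums_to_letters (s : String) (n : Int) (out : List String) : Prop := out = nums_to_letters_alt s n
instance (s : String) (n : Int) (out : List String) : Decidable (Spec_nums_to_letters s n out) := by unfold Spec_nums_to_letters; infer_instance

-- ===== CLAIM (what is proved, stated in full; the proofs are below) =====
def Claim_equal_nums_to_letters : Prop := ∀ (s : String) (n : Int), Dom_nums_to_letters s n → Spec_nums_to_letters s n (nums_to_letters s n)

-- ===== LEMMAS AND PROOFS =====

-- the pre-order DFS list of all index words of length 1..k over alphabet 0..m-1
def dfsI (m : Int) : Nat → List (List Int)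
  | 0 => []
  | k + 1 => (PySem.List.pyRange 0 m 1).flatMap (fun a => [a] :: (dfsI m k).map (a :: ·))

-- the same DFS list, on characters
def dfsC (cs : List Char) : Nat → List (List Char)
  | 0 => []
  | k + 1 => cs.flatMap (fun c => [c] :: (dfsC cs k).map (c :: ·))

-- A's unsorted generator, re-indexed over Nat
def uptoProd (m : Int) (k : Nat) : List (List Int) :=
  (List.range k).flatMap (fun j => pvProduct m (j + 1))

theorem flatMap_swap_perm {α β γ : Type} (l : List α) (l2 : List β) (h : α → β → List γ) :
    (l.flatMap (fun i => l2.flatMap (fun a => h i a))).Perm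
      (l2.flatMap (fun a => l.flatMap (fun i => h i a))) := by
  induction l with
  | nil => simp
  | cons x xs ih =>
      simp only [List.flatMap_cons]
      refine (ih.append_left _).trans ?_
      refine (List.flatMap_append_perm l2 (fun a => h x a) (fun a => xs.flatMap (fun i => h i a))).trans ?_
      simp

theorem dfsI_perm_uptoProd (m : Int) (k : Nat) : (dfsI m k).Perm (uptoProd m k) := by
  induction k with
  | zero => simp [dfsI, uptoProd]
  | succ k ih =>
      have h1 : dfsI m (k + 1)
          = (PySem.List.pyRange 0 m 1).flatMap
              (fun a => [[a]] ++ (dfsI m k).map (a :: ·)) := by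
        simp [dfsI]
      rw [h1]
      refine ((List.flatMap_append_perm (PySem.List.pyRange 0 m 1)
        (fun a => [[a]]) (fun a => (dfsI m k).map (a :: ·))).symm).trans ?_
      have h2 : uptoProd m (k + 1)
          = pvProduct m 1 ++ (List.range k).flatMap (fun j => pvProduct m (j + 2)) := by
        simp [uptoProd, List.range_succ_eq_map, List.flatMap_cons, List.flatMap_map]
      rw [h2]
      refine List.Perm.append ?_ ?_
      · simp [pvProduct]
      · -- flatMap a (map (a::·) dfsI) ~ flatMap j pvProduct (j+2)
        refine (List.Perm.flatMap_left (PySem.List.pyRange 0 m 1)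
          (fun a _ => ih.map (a :: ·))).trans ?_
        have h3 : ∀ a : Int, ((uptoProd m k).map (a :: ·))
            = (List.range k).flatMap (fun j => (pvProduct m (j + 1)).map (a :: ·)) := by
          intro a; simp [uptoProd, List.map_flatMap]
        simp only [h3]
        refine (flatMap_swap_perm _ _ _).trans ?_
        have h4 : ∀ j : Nat, (PySem.List.pyRange 0 m 1).flatMap
            (fun a => (pvProduct m (j + 1)).map (a :: ·)) = pvProduct m (j + 2) := by
          intro j; rfl
        simp only [h4]
        exact List.Perm.refl _

theorem dfsI_ne_nil (m : Int) (k : Nat) : ∀ x ∈ dfsI m k, x ≠ [] := by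
  induction k with
  | zero => simp [dfsI]
  | succ k ih =>
      intro x hx
      simp only [dfsI, List.mem_flatMap, List.mem_cons, List.mem_map] at hx
      obtain ⟨a, _, hx⟩ := hx
      rcases hx with h | ⟨t, _, h⟩ <;> subst h <;> simp

theorem dfsI_head (m : Int) (k : Nat) (a : Int) :
    ∀ x ∈ ([a] :: (dfsI m k).map (a :: ·)), ∃ t, x = a :: t := by
  intro x hx
  rcases List.mem_cons.1 hx with h | h
  · exact ⟨[], h⟩
  · obtain ⟨t, _, ht⟩ := List.mem_map.1 h
    exact ⟨t, ht.symm⟩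

theorem lt_of_lex (a b : List Int) (h : List.Lex (· < ·) a b) : a < b :=
  (List.lt_iff_lex_lt a b).2 h

theorem dfsI_pairwise (m : Int) (k : Nat) : (dfsI m k).Pairwise (· < ·) := by
  induction k with
  | zero => simp [dfsI]
  | succ k ih =>
      simp only [dfsI]
      rw [List.pairwise_flatMap]
      constructor
      · intro a _
        constructor
        · intro y hy
          obtain ⟨t, ht, rfl⟩ := List.mem_map.1 hy
          rcases t with _ | ⟨c, t⟩
          · exact absurd rfl (dfsI_ne_nil m k [] ht)
          · exact lt_of_lex _ _ (List.Lex.cons List.Lex.nil)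
        · rw [List.pairwise_map]
          exact ih.imp (fun h => lt_of_lex _ _ (List.Lex.cons ((List.lt_iff_lex_lt _ _).1 h)))
      · refine (PySem.List.pairwise_lt_pyRange_one 0 m).imp_of_mem ?_
        intro a b _ _ hab x hx y hy
        obtain ⟨t, rfl⟩ := dfsI_head m k a x hx
        obtain ⟨u, rfl⟩ := dfsI_head m k b y hy
        exact lt_of_lex _ _ (List.Lex.rel hab)

-- the two (definitionally different, propositionally equal) orderings on List Int give the same sort
theorem sorted_instLT_eq (xs : List (List Int)) :
    @PySem.List.sorted (List Int) (List Int) List.instLT (fun a b => a.decidableLT b) xs (fun x => x) false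
      = @PySem.List.sorted (List Int) (List Int) List.instLinearOrder.toLT LinearOrder.toDecidableLT xs (fun x => x) false := by
  rw [@PySem.List.sorted_eq_foldl_insertBy _ _ List.instLT (fun a b => a.decidableLT b) xs (fun x => x),
      @PySem.List.sorted_eq_foldl_insertBy _ _ List.instLinearOrder.toLT LinearOrder.toDecidableLT xs (fun x => x)]
  congr 1
  funext acc x
  congr 1
  funext a b
  exact decide_eq_decide.mpr Iff.rfl

theorem perms_eq_dfsI (n m : Int) : perms_up_to_n_from_m n m = dfsI m n.toNat := by
  unfold perms_up_to_n_from_m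
  have hgen : (PySem.List.pyRange 1 (n + 1) 1).flatMap (fun i => pvProduct m i.toNat)
      = uptoProd m n.toNat := by
    rw [PySem.List.pyRange_one]
    have : (n + 1 - 1).toNat = n.toNat := by omega
    rw [this, List.flatMap_map]
    unfold uptoProd
    refine List.flatMap_congr ?_
    intro j hj
    have : ((1 : Int) + (j : Int)).toNat = j + 1 := by omega
    rw [this]
  rw [hgen, sorted_instLT_eq]
  exact PySem.List.sorted_eq_of_perm_of_pairwise_lt _ _ _
    (dfsI_perm_uptoProd m n.toNat) (dfsI_pairwise m n.toNat)

-- the dictionary d built from s is position lookup in s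
theorem create_dict_lookup (s : String) :
    (PySem.List.pyRange 0 (PySem.Str.len s) 1).map
      (fun a => PySem.Dict.getD (create_dict s) a ' ') = s.toList := by
  set cs := s.toList with hcs
  have hlen : PySem.Str.len s = (cs.length : Int) := by simp [PySem.Str.len_eq, hcs]
  have hrange : PySem.List.pyRange 0 (PySem.Str.len s) 1
      = (List.range cs.length).map (Nat.cast : Nat → Int) := by
    have ht : ((cs.length : Int) - 0).toNat = cs.length := by omega
    rw [hlen, PySem.List.pyRange_one, ht]
    exact List.map_congr_left (fun k _ => by omega)
  have hrlen : (PySem.List.pyRange 0 (PySem.Str.len s) 1).length ≤ cs.length := by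
    rw [hrange]; simp
  have hitems : (create_dict s).items
      = (PySem.List.pyRange 0 (PySem.Str.len s) 1).zip cs := by
    unfold create_dict
    show (PySem.Dict.update PySem.Dict.empty _).items = _
    unfold PySem.Dict.update
    have h := PySem.Dict.items_foldl_insert_fresh
      ((PySem.List.pyRange 0 (PySem.Str.len s) 1).zip cs) Prod.fst Prod.snd
      PySem.Dict.empty (by simp)
      (by rw [List.map_fst_zip hrlen]; exact PySem.List.nodup_pyRange_one 0 _)
    simpa using h
  have hkeys : (create_dict s).keys.Nodup := by
    show ((create_dict s).items.map (·.1)).Nodup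
    rw [hitems, List.map_fst_zip hrlen]
    exact PySem.List.nodup_pyRange_one 0 _
  rw [hrange, List.map_map]
  apply List.ext_getElem (by simp)
  intro i h1 h2
  simp only [List.getElem_map, List.getElem_range, Function.comp_apply]
  have hzlen : i < ((PySem.List.pyRange 0 (PySem.Str.len s) 1).zip cs).length := by
    rw [List.length_zip, hrange]; simp; omega
  have hmem : ((i : Int), cs[i]) ∈ (create_dict s).items := by
    rw [hitems]
    have hval : ((PySem.List.pyRange 0 (PySem.Str.len s) 1).zip cs)[i]'hzlen
        = ((i : Int), cs[i]) := by
      simp [List.getElem_zip]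
    exact hval ▸ List.getElem_mem hzlen
  exact PySem.Dict.getD_of_mem_items _ hmem hkeys ' '

theorem dfsC_eq_map_dfsI (s : String) (k : Nat) :
    dfsC s.toList k
      = (dfsI (PySem.Str.len s) k).map
          (List.map (fun a => PySem.Dict.getD (create_dict s) a ' ')) := by
  induction k with
  | zero => simp [dfsC, dfsI]
  | succ k ih =>
      show s.toList.flatMap (fun c => [c] :: (dfsC s.toList k).map (c :: ·))
        = ((PySem.List.pyRange 0 (PySem.Str.len s) 1).flatMap
            (fun a => [a] :: (dfsI (PySem.Str.len s) k).map (a :: ·))).map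
            (List.map (fun a => PySem.Dict.getD (create_dict s) a ' '))
      rw [List.map_flatMap]
      set L := dfsC s.toList k with hL
      conv_lhs => rw [← create_dict_lookup s]
      rw [List.flatMap_map]
      refine List.flatMap_congr ?_
      intro a _
      rw [ih]
      simp [List.map_map, Function.comp]

theorem alt_eq_map_dfsC (s : String) (n : Int) :
    nums_to_letters_alt s n = (dfsC s.toList n.toNat).map String.ofList := by
  unfold nums_to_letters_alt
  rw [PySem.List.pyRange_one]
  have : (n - 0).toNat = n.toNat := by omega
  rw [this, List.foldl_map]
  induction n.toNat with
  | zero => simp [dfsC]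
  | succ k ih =>
      rw [List.range_succ, List.foldl_append, ih]
      simp only [List.foldl_cons, List.foldl_nil]
      have hstep : ∀ c : Char,
          (("" :: (dfsC s.toList k).map String.ofList).map
            (fun w => String.ofList (c :: w.toList)))
          = ([c] :: (dfsC s.toList k).map (c :: ·)).map String.ofList := by
        intro c
        simp [List.map_map, Function.comp, String.toList_ofList]
      simp only [hstep]
      show _ = (dfsC s.toList (k+1)).map String.ofList
      simp only [dfsC, List.map_flatMap]

-- ===== VERDICT (by name: the statement is the Claim_ definition above) =====
theorem nums_to_letters_spec : Claim_equal_nums_to_letters := by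
  intro s n _
  show nums_to_letters s n = nums_to_letters_alt s n
  have hA : nums_to_letters s n
      = ((perms_up_to_n_from_m n (PySem.Str.len s)).map
          (fun x => x.map (fun num => PySem.Dict.getD (create_dict s) num ' '))).map
          String.ofList := rfl
  rw [hA, perms_eq_dfsI, alt_eq_map_dfsC, dfsC_eq_map_dfsI]
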